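-- pv_equiv track=rewrite | github.com/vinci1it2000/schedula | co2mpas/functions/io/excel.py | _sort_sheets
-- ===== SOURCE A (Python) =====
-- def _sort_sheets(x):
--     imp = ['comparison', 'graphs', 'nedc', 'wltp_h',
--            'wltp_l', 'wltp_p', 'predictions', 'inputs', 'parameters',
--            'time_series', 'selection_scores']
--
--     w = ()
--     for i, k in enumerate(imp):
--         if k in x:
--             w = (i,) + _sort_sheets(set(x) - {k})[0]
--             break
--     return w or (100,), x
-- ===== SOURCE B (Python) =====
-- def _sort_sheets(x):
--     # B: closed form — one pass over the fixed keyword list instead of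
--     # recursive set-removal; collects the indices of keywords present.
--     imp = ['comparison', 'graphs', 'nedc', 'wltp_h',
--            'wltp_l', 'wltp_p', 'predictions', 'inputs', 'parameters',
--            'time_series', 'selection_scores']
--     xs = set(x)
--     return tuple(i for i, k in enumerate(imp) if k in xs) + (100,), x
-- ===== Notes on version B (the rewrite author's own statement) =====
-- stated objective: simpler
-- what changed: Replaces the recursion that repeatedly rebuilds set(x)-{k} and rescans the keyword list from the start with a single non-recursive pass over the fixed keyword list, collecting the indices of keywords present (they come out in the same increasing order A produces).
import Mathlib
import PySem

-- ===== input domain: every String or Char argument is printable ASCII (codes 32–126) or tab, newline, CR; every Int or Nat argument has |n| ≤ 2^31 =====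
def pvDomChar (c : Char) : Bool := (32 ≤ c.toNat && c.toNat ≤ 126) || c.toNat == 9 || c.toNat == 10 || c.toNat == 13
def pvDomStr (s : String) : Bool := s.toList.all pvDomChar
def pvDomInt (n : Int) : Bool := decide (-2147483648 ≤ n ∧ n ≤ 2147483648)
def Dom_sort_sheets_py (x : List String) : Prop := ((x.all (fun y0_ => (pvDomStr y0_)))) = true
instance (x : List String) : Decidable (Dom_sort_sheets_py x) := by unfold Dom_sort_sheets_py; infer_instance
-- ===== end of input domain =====

-- B replaces A's recursive set-removal with one non-recursive pass over the fixed keyword list (simpler).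


-- ===== PORT A =====
-- termination helper: removing a keyword that is in x strictly shrinks the deduplicated list
theorem pv_diff_lt (x : List String) (k : String) (hk : k ∈ x) :
    (PySem.Set.diff (PySem.Set.ofList x) [k]).length < x.length := by
  have h1 : ((PySem.Set.ofList x).filter (fun a => !PySem.Set.contains [k] a)).length
      < (PySem.Set.ofList x).length := by
    refine List.length_filter_lt_length_iff_exists.mpr ?_
    exact ⟨k, (PySem.Set.mem_ofList x k).mpr hk, by simp [PySem.Set.contains]⟩
  exact lt_of_lt_of_le (by simpa [PySem.Set.diff] using h1) (PySem.Set.length_ofList_le x)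

def sort_sheets_py (x : List String) : List Int × List String :=
  let imp : List String := ["comparison", "graphs", "nedc", "wltp_h",
      "wltp_l", "wltp_p", "predictions", "inputs", "parameters",
      "time_series", "selection_scores"]
  -- 'for i, k in enumerate(imp): if k in x: w = (i,) + rec(...)[0]; break'
  let w : List Int :=
    match h : (PySem.List.enumerate imp 0).find? (fun p => decide (p.2 ∈ x)) with
    | none => []
    | some (i, k) =>
        i :: (sort_sheets_py (PySem.Set.diff (PySem.Set.ofList x) [k])).1
  ((if w.isEmpty then [(100 : Int)] else w), x)
termination_by x.length
decreasing_by
  exact pv_diff_lt x k (by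
    have := List.find?_some h
    simpa using this)

-- ===== PORT B =====
def sort_sheets_py_alt (x : List String) : List Int × List String :=
  let imp : List String := ["comparison", "graphs", "nedc", "wltp_h",
      "wltp_l", "wltp_p", "predictions", "inputs", "parameters",
      "time_series", "selection_scores"]
  let xs : PySem.Set String := PySem.Set.ofList x
  (((PySem.List.enumerate imp 0).filter (fun p => PySem.Set.contains xs p.2)).map
      (fun p => p.1) ++ [(100 : Int)], x)

-- ===== PRECONDITION & SPEC =====
def Spec_sort_sheets_py (x : List String) (out : List Int × List String) : Prop := out = sort_sheets_py_alt x
instance (x : List String) (out : List Int × List String) : Decidable (Spec_sort_sheets_py x out) := by unfold Spec_sort_sheets_py; infer_instance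

-- ===== CLAIM (what is proved, stated in full; the proofs are below) =====
def Claim_equal_sort_sheets_py : Prop := ∀ (x : List String), Dom_sort_sheets_py x → Spec_sort_sheets_py x (sort_sheets_py x)

-- ===== LEMMAS AND PROOFS =====

-- the fixed keyword list, for the proofs
def pvImp : List String := ["comparison", "graphs", "nedc", "wltp_h",
    "wltp_l", "wltp_p", "predictions", "inputs", "parameters",
    "time_series", "selection_scores"]

-- membership in set(x) - {k}
theorem pv_mem_diff (x : List String) (k q : String) :
    q ∈ PySem.Set.diff (PySem.Set.ofList x) [k] ↔ q ∈ x ∧ q ≠ k := by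
  rw [PySem.Set.mem_diff, PySem.Set.mem_ofList]
  simp

-- if the first keyword present in x is k (at index i), then the matching pairs of x
-- are (i,k) followed by the pairs matching x-with-k-removed — provided the snds are distinct
theorem pv_filter_find (ps : List (Int × String)) (x : List String) (i : Int) (k : String)
    (hnd : (ps.map (fun p => p.2)).Nodup)
    (hf : ps.find? (fun p => decide (p.2 ∈ x)) = some (i, k)) :
    ps.filter (fun p => decide (p.2 ∈ x))
      = (i, k) :: ps.filter (fun p => decide (p.2 ∈ x ∧ p.2 ≠ k)) := by
  induction ps with
  | nil => simp at hf
  | cons p ps ih =>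
    simp only [List.map_cons, List.nodup_cons] at hnd
    by_cases hm : p.2 ∈ x
    · rw [List.find?_cons_of_pos (by simpa using hm)] at hf
      obtain ⟨rfl, rfl⟩ : i = p.1 ∧ k = p.2 := by
        cases hf; exact ⟨rfl, rfl⟩
      rw [List.filter_cons_of_pos (by simpa using hm),
          List.filter_cons_of_neg (by simp)]
      congr 1
      refine (List.filter_congr ?_).symm
      intro q hq
      have : q.2 ≠ p.2 := fun e => hnd.1 (e ▸ List.mem_map_of_mem hq)
      simp [this]
    · rw [List.find?_cons_of_neg (by simpa using hm)] at hf
      rw [List.filter_cons_of_neg (by simpa using hm),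
          List.filter_cons_of_neg (by simp [hm])]
      exact ih hnd.2 hf

theorem pv_enum_lit : PySem.List.enumerate pvImp 0
    = [((0:Int), "comparison"), (1, "graphs"), (2, "nedc"), (3, "wltp_h"), (4, "wltp_l"),
       (5, "wltp_p"), (6, "predictions"), (7, "inputs"), (8, "parameters"),
       (9, "time_series"), (10, "selection_scores")] := by decide

-- the characterisation of A's first component
theorem pv_fst (x : List String) :
    (sort_sheets_py x).1
      = ((PySem.List.enumerate pvImp 0).filter (fun p => decide (p.2 ∈ x))).map
          (fun p => p.1) ++ [(100 : Int)] := by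
  induction hn : x.length using Nat.strong_induction_on generalizing x with
  | _ n ih =>
  subst hn
  rw [sort_sheets_py]
  simp only []
  rw [pv_enum_lit]
  split
  case _ hfind =>
    have hfind' : (PySem.List.enumerate pvImp 0).find? (fun p => decide (p.2 ∈ x)) = none := hfind
    have hall := List.find?_eq_none.mp hfind'
    clear hfind
    have hnil : (PySem.List.enumerate pvImp 0).filter (fun p => decide (p.2 ∈ x)) = [] := by
      refine List.filter_eq_nil_iff.mpr ?_
      intro p hp
      simpa using hall p hp
    rw [← pv_enum_lit, hnil]
    simp
  case _ i k hfind =>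
    have hfind' : (PySem.List.enumerate pvImp 0).find? (fun p => decide (p.2 ∈ x)) = some (i, k) := hfind
    clear hfind
    have hfind := hfind'
    have hk : k ∈ x := by simpa using List.find?_some hfind
    have hnd : ((PySem.List.enumerate pvImp 0).map (fun p => p.2)).Nodup := by
      rw [PySem.List.map_snd_enumerate]; decide
    have hstep := pv_filter_find (PySem.List.enumerate pvImp 0) x i k hnd hfind
    have hlt := pv_diff_lt x k hk
    have hrec := ih _ hlt (PySem.Set.diff (PySem.Set.ofList x) [k]) rfl
    have hcongr : (PySem.List.enumerate pvImp 0).filter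
          (fun p => decide (p.2 ∈ PySem.Set.diff (PySem.Set.ofList x) [k]))
        = (PySem.List.enumerate pvImp 0).filter (fun p => decide (p.2 ∈ x ∧ p.2 ≠ k)) := by
      refine List.filter_congr ?_
      intro p _
      simp only [decide_eq_decide]
      rw [pv_mem_diff]
    rw [hcongr] at hrec
    rw [← pv_enum_lit, hstep, hrec]
    simp

-- A always returns the original x in the second slot
theorem pv_snd (x : List String) : (sort_sheets_py x).2 = x := by
  rw [sort_sheets_py]

-- ===== VERDICT (by name: the statement is the Claim_ definition above) =====
theorem sort_sheets_py_spec : Claim_equal_sort_sheets_py := by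
  intro x _
  unfold Spec_sort_sheets_py sort_sheets_py_alt
  refine Prod.ext ?_ ?_
  · rw [pv_fst x]
    show _ = ((PySem.List.enumerate pvImp 0).filter _).map _ ++ _
    congr 1
    congr 1
    refine List.filter_congr ?_
    intro p _
    simp [PySem.Set.mem_ofList]
  · exact pv_snd x
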